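-- pv_equiv track=rewrite | github.com/sagnam/mekhq-blog | process_campaign.py | check_rank
-- ===== SOURCE A (Python) =====
-- def check_rank(rank, rank_level, rank_list):
--     if(rank == '--MW'):
--         rank = rank_list[0][rank_level]
--     elif(rank == '--ASF'):
--         rank = rank_list[1][rank_level]
--     elif(rank == '--VEE'):
--         rank = rank_list[2][rank_level]
--     elif(rank == '--NAVAL'):
--         rank = rank_list[3][rank_level]
--     elif(rank == '--INF'):
--         rank = rank_list[4][rank_level]
--     elif(rank == '--TECH'):
--         rank = rank_list[5][rank_level]
--     else:
--         return rank
--     return check_rank(rank, rank_level, rank_list)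
-- ===== SOURCE B (Python) =====
-- def check_rank(rank, rank_level, rank_list):
--     markers = {'--MW': 0, '--ASF': 1, '--VEE': 2, '--NAVAL': 3, '--INF': 4, '--TECH': 5}
--     while rank in markers:
--         rank = rank_list[markers[rank]][rank_level]
--     return rank
-- ===== Notes on version B (the rewrite author's own statement) =====
-- stated objective: simpler
-- what changed: Replaces the six-branch if/elif chain with a marker->index dict and turns the tail recursion into an iterative while loop that follows the indirection chain.
import Mathlib
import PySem

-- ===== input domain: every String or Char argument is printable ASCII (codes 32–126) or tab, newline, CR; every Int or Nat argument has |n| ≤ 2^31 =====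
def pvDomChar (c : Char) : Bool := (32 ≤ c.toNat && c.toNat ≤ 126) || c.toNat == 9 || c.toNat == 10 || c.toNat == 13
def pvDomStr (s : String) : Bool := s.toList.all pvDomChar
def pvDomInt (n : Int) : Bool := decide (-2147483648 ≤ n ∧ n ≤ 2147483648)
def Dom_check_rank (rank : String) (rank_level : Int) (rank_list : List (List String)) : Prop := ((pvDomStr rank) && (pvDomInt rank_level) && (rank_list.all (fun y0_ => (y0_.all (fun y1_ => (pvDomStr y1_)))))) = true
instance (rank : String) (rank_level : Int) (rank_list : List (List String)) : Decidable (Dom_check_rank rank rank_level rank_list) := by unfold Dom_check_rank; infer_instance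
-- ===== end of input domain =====

-- B replaces A's six-branch if/elif chain + tail recursion by a marker→index dict
-- and an iterative while loop over the same indirection chain (objective: simpler).


-- ===== PORT A =====
-- Transliteration of A's tail recursion, made total with a fuel counter of 7:
-- there are only 6 marker strings, so any chain of more than 6 marker steps revisits a
-- marker and Python's recursion never terminates (RecursionError) — excluded by Pre_.
-- A failed index lookup (Python IndexError, also excluded by Pre_) falls back to "".
def check_rank_go (fuel : Nat) (rank : String) (rank_level : Int) (rank_list : List (List String)) : String :=
  match fuel with
  | 0 => rank
  | fuel + 1 =>
    if rank = "--MW" then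
      check_rank_go fuel ((PySem.List.pyGet? ((PySem.List.pyGet? rank_list 0).getD []) rank_level).getD "") rank_level rank_list
    else if rank = "--ASF" then
      check_rank_go fuel ((PySem.List.pyGet? ((PySem.List.pyGet? rank_list 1).getD []) rank_level).getD "") rank_level rank_list
    else if rank = "--VEE" then
      check_rank_go fuel ((PySem.List.pyGet? ((PySem.List.pyGet? rank_list 2).getD []) rank_level).getD "") rank_level rank_list
    else if rank = "--NAVAL" then
      check_rank_go fuel ((PySem.List.pyGet? ((PySem.List.pyGet? rank_list 3).getD []) rank_level).getD "") rank_level rank_list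
    else if rank = "--INF" then
      check_rank_go fuel ((PySem.List.pyGet? ((PySem.List.pyGet? rank_list 4).getD []) rank_level).getD "") rank_level rank_list
    else if rank = "--TECH" then
      check_rank_go fuel ((PySem.List.pyGet? ((PySem.List.pyGet? rank_list 5).getD []) rank_level).getD "") rank_level rank_list
    else
      rank

def check_rank (rank : String) (rank_level : Int) (rank_list : List (List String)) : String :=
  check_rank_go 7 rank rank_level rank_list

-- ===== PORT B =====
-- the dict B builds once
def pvMarkers : PySem.Dict String Int :=
  PySem.Dict.ofList [("--MW", 0), ("--ASF", 1), ("--VEE", 2), ("--NAVAL", 3), ("--INF", 4), ("--TECH", 5)]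

-- B's `while rank in markers:` loop, made total with the same fuel bound of 7
-- (inside Pre_ the chain resolves within 6 steps, so the fuel is never exhausted).
def check_rank_alt_go (fuel : Nat) (rank : String) (rank_level : Int) (rank_list : List (List String)) : String :=
  match fuel with
  | 0 => rank
  | fuel + 1 =>
    match PySem.Dict.get? pvMarkers rank with
    | some i => check_rank_alt_go fuel ((PySem.List.pyGet? ((PySem.List.pyGet? rank_list i).getD []) rank_level).getD "") rank_level rank_list
    | none => rank

def check_rank_alt (rank : String) (rank_level : Int) (rank_list : List (List String)) : String :=
  check_rank_alt_go 7 rank rank_level rank_list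

-- ===== PRECONDITION & SPEC =====
-- one indirection step: a marker resolves via its table entry (none = Python IndexError),
-- a non-marker stays put
def pvIsMarker (s : String) : Bool :=
  s == "--MW" || s == "--ASF" || s == "--VEE" || s == "--NAVAL" || s == "--INF" || s == "--TECH"

def pvResolve (rank_level : Int) (rank_list : List (List String)) (s : String) : Option String :=
  if s = "--MW" then (PySem.List.pyGet? rank_list 0).bind (fun row => PySem.List.pyGet? row rank_level)
  else if s = "--ASF" then (PySem.List.pyGet? rank_list 1).bind (fun row => PySem.List.pyGet? row rank_level)
  else if s = "--VEE" then (PySem.List.pyGet? rank_list 2).bind (fun row => PySem.List.pyGet? row rank_level)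
  else if s = "--NAVAL" then (PySem.List.pyGet? rank_list 3).bind (fun row => PySem.List.pyGet? row rank_level)
  else if s = "--INF" then (PySem.List.pyGet? rank_list 4).bind (fun row => PySem.List.pyGet? row rank_level)
  else if s = "--TECH" then (PySem.List.pyGet? rank_list 5).bind (fun row => PySem.List.pyGet? row rank_level)
  else some s

-- Pre_ excludes exactly the inputs where Python A raises: an out-of-range table lookup
-- along the indirection chain (IndexError) or a chain that never reaches a non-marker
-- (cyclic among the 6 markers: RecursionError). Since there are only 6 marker strings,
-- a chain that is still at a marker after 7 resolution steps has revisited one and cycles,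
-- so 7 unrolled steps characterise termination exactly.
def Pre_check_rank (rank : String) (rank_level : Int) (rank_list : List (List String)) : Prop :=
  (Option.any (fun v => !pvIsMarker v)
    (((((((some rank >>= pvResolve rank_level rank_list) >>= pvResolve rank_level rank_list)
      >>= pvResolve rank_level rank_list) >>= pvResolve rank_level rank_list)
      >>= pvResolve rank_level rank_list) >>= pvResolve rank_level rank_list)
      >>= pvResolve rank_level rank_list)) = true
instance (rank : String) (rank_level : Int) (rank_list : List (List String)) : Decidable (Pre_check_rank rank rank_level rank_list) := by unfold Pre_check_rank; infer_instance

def pvWitness_check_rank : String × Int × List (List String) :=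
  ("--MW", 0, [["Sergeant"], ["FO"], ["Corporal"], ["Ensign"], ["Private"], ["Astech"]])

def Spec_check_rank (rank : String) (rank_level : Int) (rank_list : List (List String)) (out : String) : Prop := out = check_rank_alt rank rank_level rank_list
instance (rank : String) (rank_level : Int) (rank_list : List (List String)) (out : String) : Decidable (Spec_check_rank rank rank_level rank_list out) := by unfold Spec_check_rank; infer_instance

-- ===== CLAIM (what is proved, stated in full; the proofs are below) =====
def Claim_equal_check_rank : Prop := ∀ (rank : String) (rank_level : Int) (rank_list : List (List String)), Dom_check_rank rank rank_level rank_list → Pre_check_rank rank rank_level rank_list → Spec_check_rank rank rank_level rank_list (check_rank rank rank_level rank_list)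

-- ===== LEMMAS AND PROOFS =====
theorem pvMarkers_eq : pvMarkers = PySem.Dict.mk [("--MW", 0), ("--ASF", 1), ("--VEE", 2), ("--NAVAL", 3), ("--INF", 4), ("--TECH", 5)] := by
  decide

-- both loop bodies perform the same state transition, so the two fuel recursions coincide
theorem go_eq (fuel : Nat) (rank : String) (rank_level : Int) (rank_list : List (List String)) :
    check_rank_go fuel rank rank_level rank_list = check_rank_alt_go fuel rank rank_level rank_list := by
  induction fuel generalizing rank with
  | zero => rfl
  | succ n ih =>
    rw [check_rank_go, check_rank_alt_go, pvMarkers_eq]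
    by_cases h1 : rank = "--MW"
    · simp [h1, PySem.Dict.get?_mk_cons, ih]
    by_cases h2 : rank = "--ASF"
    · simp [h2, PySem.Dict.get?_mk_cons, ih]
    by_cases h3 : rank = "--VEE"
    · simp [h3, PySem.Dict.get?_mk_cons, ih]
    by_cases h4 : rank = "--NAVAL"
    · simp [h4, PySem.Dict.get?_mk_cons, ih]
    by_cases h5 : rank = "--INF"
    · simp [h5, PySem.Dict.get?_mk_cons, ih]
    by_cases h6 : rank = "--TECH"
    · simp [h6, PySem.Dict.get?_mk_cons, ih]
    · simp [h1, h2, h3, h4, h5, h6, Ne.symm h1, Ne.symm h2, Ne.symm h3, Ne.symm h4,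
            Ne.symm h5, Ne.symm h6, PySem.Dict.get?]

-- ===== VERDICT (by name: the statement is the Claim_ definition above) =====
theorem check_rank_spec : Claim_equal_check_rank := by
  intro rank rank_level rank_list _ _
  unfold Spec_check_rank check_rank check_rank_alt
  exact go_eq 7 rank rank_level rank_list
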